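-- pv_equiv track=rewrite | github.com/sirbastiano/PyNA-tta-S | classes/individual.py | architecture2chromosome
-- ===== SOURCE A (Python) =====
-- def architecture2chromosome(input_architecture):
--     """
--     Converts an architecture code into a chromosome list.
--
--     Example:
--     Input: "c1gc1rm1rMC"
--     Output: ["c1g", "c1r", "m1r", "M", "C"]
--     """
--     # Initialize an empty chromosome list
--     chromosome = []
--
--     # Loop through the architecture code to extract genes
--     i = 0
--     while i < len(input_architecture):
--         # Check if at the last two characters (pooling layer and head)
--         if i >= len(input_architecture) - 2:
--             chromosome.append(input_architecture[i])
--             i += 1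
--         else:
--             # Extract the triplet and add it as a gene
--             gene = input_architecture[i:i+3]
--             chromosome.append(gene)
--             i += 3
--
--     return chromosome
-- ===== SOURCE B (Python) =====
-- def architecture2chromosome(input_architecture):
--     """Converts an architecture code into a chromosome list.
--
--     Single character-wise pass with a gene buffer: each character is pushed into
--     the buffer; a full buffer of 3 is flushed as one gene; whatever is left in
--     the buffer at the end (< 3 chars) is appended character by character.
--     """
--     chromosome = []
--     buf = ""
--     for ch in input_architecture:
--         buf += ch
--         if len(buf) == 3:
--             chromosome.append(buf)
--             buf = ""
--     chromosome.extend(buf)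
--     return chromosome
-- ===== Notes on version B (the rewrite author's own statement) =====
-- stated objective: alternative
-- what changed: Replaces A's index-mutating while loop with its per-step boundary test and slicing by a single character-wise pass maintaining a gene buffer that is flushed whenever it reaches 3 characters, with leftover buffer characters appended singly at the end; no indices or slices are used.
import Mathlib
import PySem

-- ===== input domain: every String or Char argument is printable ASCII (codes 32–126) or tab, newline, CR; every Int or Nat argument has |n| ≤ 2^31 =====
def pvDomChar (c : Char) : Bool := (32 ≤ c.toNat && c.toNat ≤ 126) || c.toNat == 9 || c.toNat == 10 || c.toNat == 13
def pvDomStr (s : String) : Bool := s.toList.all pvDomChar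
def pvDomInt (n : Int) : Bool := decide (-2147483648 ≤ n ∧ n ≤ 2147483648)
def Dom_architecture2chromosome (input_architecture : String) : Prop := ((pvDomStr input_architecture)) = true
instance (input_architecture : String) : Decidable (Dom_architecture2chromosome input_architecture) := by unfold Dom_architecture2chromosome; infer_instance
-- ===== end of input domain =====

-- B replaces A's index-mutating while loop (boundary test + slicing) by one character-wise
-- pass with a gene buffer flushed at 3 chars, leftovers appended singly (objective: alternative).

-- ===== PORT A =====
-- A's while loop: i advances by 1 (singleton branch, 'i >= len - 2') or by 3 (triplet branch).
-- 'i >= len(s) - 2' over Python ints is 'len ≤ i + 2' over Nat; s[i:i+3] = (drop i).take 3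
-- (exact for nonnegative in-range bounds); s[i] = cs[i] as a 1-char string.
def archA_loop (cs : List Char) (i : Nat) : List String :=
  if h : i < cs.length then
    if cs.length ≤ i + 2 then
      String.ofList [cs[i]] :: archA_loop cs (i + 1)
    else
      String.ofList ((cs.drop i).take 3) :: archA_loop cs (i + 3)
  else []
termination_by cs.length - i
decreasing_by all_goals omega

def architecture2chromosome (input_architecture : String) : List String :=
  archA_loop input_architecture.toList 0

-- ===== PORT B =====
-- for ch in s: buf += ch; if len(buf) == 3: flush.  Then chromosome.extend(buf)
-- (extend of a string appends its characters one by one, as 1-char strings).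
def archB_step (st : List String × List Char) (c : Char) : List String × List Char :=
  let buf := st.2 ++ [c]
  if buf.length == 3 then (st.1 ++ [String.ofList buf], []) else (st.1, buf)

def architecture2chromosome_alt (input_architecture : String) : List String :=
  let st := input_architecture.toList.foldl archB_step ([], [])
  st.1 ++ st.2.map (fun c => String.ofList [c])

-- ===== PRECONDITION & SPEC =====
def Spec_architecture2chromosome (input_architecture : String) (out : List String) : Prop := out = architecture2chromosome_alt input_architecture
instance (input_architecture : String) (out : List String) : Decidable (Spec_architecture2chromosome input_architecture out) := by unfold Spec_architecture2chromosome; infer_instance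

-- ===== CLAIM =====
def Claim_equal_architecture2chromosome : Prop := ∀ (input_architecture : String), Dom_architecture2chromosome input_architecture → Spec_architecture2chromosome input_architecture (architecture2chromosome input_architecture)

-- ===== LEMMAS AND PROOFS =====

-- Canonical chunking both ports are proved equal to: triplets greedily, then singletons.
def archChunks (cs : List Char) : List String :=
  if cs.length < 3 then cs.map (fun c => String.ofList [c])
  else String.ofList (cs.take 3) :: archChunks (cs.drop 3)
termination_by cs.length
decreasing_by simp; omega

-- A-side: shifting the loop index by 3 is dropping 3 characters.
lemma archA_loop_shift (cs : List Char) (h3 : 3 ≤ cs.length) :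
    ∀ d i, cs.length - (3 + i) = d → archA_loop cs (3 + i) = archA_loop (cs.drop 3) i := by
  intro d
  induction d using Nat.strong_induction_on with
  | _ d ih =>
    intro i h1
    unfold archA_loop
    have hlen : (cs.drop 3).length = cs.length - 3 := by simp
    by_cases h : 3 + i < cs.length
    · rw [dif_pos h, dif_pos (by omega)]
      by_cases hb : cs.length ≤ 3 + i + 2
      · rw [if_pos hb, if_pos (by omega)]
        have he : cs[3 + i] = (cs.drop 3)[i]'(by omega) := by
          simp [List.getElem_drop]
        rw [he]
        have : 3 + i + 1 = 3 + (i + 1) := by omega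
        rw [this, ih (cs.length - (3 + (i+1))) (by omega) (i+1) rfl]
      · rw [if_neg hb, if_neg (by omega)]
        have he : cs.drop (3 + i) = (cs.drop 3).drop i := by
          rw [List.drop_drop]
        rw [he]
        have : 3 + i + 3 = 3 + (i + 3) := by omega
        rw [this, ih (cs.length - (3 + (i+3))) (by omega) (i+3) rfl]
    · rw [dif_neg h, dif_neg (by omega)]

-- A-side: once within the last two characters, A emits singletons.
lemma archA_loop_singles (cs : List Char) :
    ∀ d i, cs.length - i = d → cs.length ≤ i + 2 →
      archA_loop cs i = (cs.drop i).map (fun c => String.ofList [c]) := by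
  intro d
  induction d with
  | zero =>
    intro i h1 h2
    unfold archA_loop
    rw [dif_neg (by omega)]
    rw [List.drop_eq_nil_of_le (by omega)]
    simp
  | succ d ih =>
    intro i h1 h2
    have hi : i < cs.length := by omega
    unfold archA_loop
    rw [dif_pos hi, if_pos h2]
    rw [ih (i + 1) (by omega) (by omega)]
    conv_rhs => rw [List.drop_eq_getElem_cons hi]
    rw [List.map_cons]

-- A equals the canonical chunking.
lemma archA_eq_chunks (cs : List Char) : archA_loop cs 0 = archChunks cs := by
  induction hn : cs.length using Nat.strong_induction_on generalizing cs with
  | _ n ih =>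
    by_cases h3 : cs.length < 3
    · rw [archA_loop_singles cs cs.length 0 (by omega) (by omega)]
      unfold archChunks
      rw [if_pos h3]
      simp
    · unfold archChunks
      rw [if_neg h3]
      unfold archA_loop
      rw [dif_pos (by omega), if_neg (by omega)]
      rw [List.drop_zero, show (0:Nat) + 3 = 3 + 0 from by omega,
          archA_loop_shift cs (by omega) (cs.length - (3 + 0)) 0 rfl]
      rw [ih (cs.drop 3).length (by simp; omega) (cs.drop 3) rfl]

-- B-side: one step of the fold, by cases on whether the buffer fills.
lemma archB_step_full (a : List String) (b : List Char) (c : Char)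
    (h : (b ++ [c]).length = 3) :
    archB_step (a, b) c = (a ++ [String.ofList (b ++ [c])], []) := by
  simp [archB_step, h]

lemma archB_step_part (a : List String) (b : List Char) (c : Char)
    (h : (b ++ [c]).length ≠ 3) :
    archB_step (a, b) c = (a, b ++ [c]) := by
  simp only [archB_step]
  rw [if_neg (by simpa using h)]

-- B-side: fold invariant relating the running state to the canonical chunking.
lemma archB_invariant (cs : List Char) :
    ∀ acc buf, buf.length ≤ 2 →
      (let st := cs.foldl archB_step (acc, buf)
       st.1 ++ st.2.map (fun c => String.ofList [c])) = acc ++ archChunks (buf ++ cs) := by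
  induction cs with
  | nil =>
    intro acc buf hb
    simp only [List.foldl_nil, List.append_nil]
    unfold archChunks
    rw [if_pos (by omega)]
  | cons c cs ih =>
    intro acc buf hb
    rw [List.foldl_cons]
    by_cases hf : (buf ++ [c]).length = 3
    · rw [archB_step_full acc buf c hf]
      rw [ih (acc ++ [String.ofList (buf ++ [c])]) [] (by simp)]
      have hfull : buf ++ c :: cs = (buf ++ [c]) ++ cs := by simp
      rw [hfull]
      conv_rhs => rw [archChunks]
      rw [if_neg (by simp at hf ⊢; omega)]
      rw [List.take_append_of_le_length (by omega),
          List.drop_append_of_le_length (by omega)]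
      rw [List.take_of_length_le (by omega), List.drop_eq_nil_of_le (by omega),
          List.nil_append]
      simp
    · rw [archB_step_part acc buf c hf]
      have hlen : (buf ++ [c]).length ≤ 2 := by simp at hf ⊢; omega
      rw [ih acc (buf ++ [c]) hlen]
      simp

-- ===== VERDICT =====
theorem architecture2chromosome_spec : Claim_equal_architecture2chromosome := by
  intro s _
  unfold Spec_architecture2chromosome architecture2chromosome architecture2chromosome_alt
  rw [archA_eq_chunks]
  have := archB_invariant s.toList [] [] (by simp)
  simpa using this.symm
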